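-- pv_equiv track=rewrite | github.com/gxyd/competitive-programming | hackerrank.py | func
-- ===== SOURCE A (Python) =====
-- def func(string, hack):
--     if string == hack:
--         return True
--     if len(string) == 0:
--         return False
--     if string[0] == hack[0]:
--         return func(string[1:], hack[1:])
--     else:
--         return func(string[1:], hack)
-- ===== SOURCE B (Python) =====
-- def func(string, hack):
--     n, m = len(string), len(hack)
--     d = n - m
--     if d < 0:
--         return False
--     i = j = 0
--     while j < m and i - j < d:
--         if string[i] == hack[j]:
--             i += 1
--             j += 1
--         else:
--             i += 1
--     return string[i:] == hack[j:]
-- ===== Notes on version B (the rewrite author's own statement) =====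
-- stated objective: faster
-- what changed: Replaces A's recursion, which re-tests whole-suffix equality and builds a slice at every step, with a single two-pointer index scan that compares one character per step and does one final suffix comparison at the fixed length-difference offset.
-- outside the precondition, e.g. on func('ab', 'a'): A raises IndexError, B returns False; on func('x', ''): A raises IndexError, B returns False
import Mathlib
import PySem

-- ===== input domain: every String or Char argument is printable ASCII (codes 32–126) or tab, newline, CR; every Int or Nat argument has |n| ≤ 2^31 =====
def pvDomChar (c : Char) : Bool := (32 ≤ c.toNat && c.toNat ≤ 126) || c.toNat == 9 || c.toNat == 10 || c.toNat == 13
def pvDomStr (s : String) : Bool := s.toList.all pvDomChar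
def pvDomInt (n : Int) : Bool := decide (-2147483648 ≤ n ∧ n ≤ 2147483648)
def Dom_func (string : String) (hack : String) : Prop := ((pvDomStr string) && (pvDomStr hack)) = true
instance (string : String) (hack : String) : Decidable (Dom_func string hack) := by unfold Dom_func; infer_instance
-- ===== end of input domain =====

-- B replaces A's O(n^2) recursion (a fresh suffix-equality test and slice at every step)
-- with a single two-pointer scan plus one final suffix comparison (objective: faster).

-- ===== PORT A =====
-- A's recursion: equality check, empty check, then drop the head of `string`
-- (and of `hack` too when the heads match).
def funcA : List Char → List Char → Bool
  | s, h =>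
    if s = h then true
    else
      match s with
      | [] => false
      | c :: s' =>
        match h with
        | [] => false   -- Python raises IndexError (hack[0]) here; excluded by Pre_func
        | b :: h' => if c = b then funcA s' h' else funcA s' (b :: h')

def func (string : String) (hack : String) : Bool :=
  funcA string.toList hack.toList

-- ===== PORT B =====
-- B's while loop: i, j start at 0 and only grow, so they are Nats here; j ≤ i
-- throughout a run from (0,0), so Nat subtraction i - j matches Python's i - j.
def loopB (s h : List Char) (d : Nat) (i j : Nat) : Nat × Nat :=
  if _hg : j < h.length ∧ i - j < d then
    match s[i]? with
    | some a =>
      match h[j]? with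
      | some b =>
        if a = b then loopB s h d (i + 1) (j + 1) else loopB s h d (i + 1) j
      | none => (i, j)   -- unreachable: the guard gives j < h.length
    | none => (i, j)     -- unreachable from func_alt: i < s.length there (loop invariant)
  else (i, j)
termination_by d + h.length - i
decreasing_by all_goals omega

def func_alt (string : String) (hack : String) : Bool :=
  let s := string.toList
  let h := hack.toList
  if (s.length : Int) - (h.length : Int) < 0 then false
  else
    let p := loopB s h (s.length - h.length) 0 0
    decide (s.drop p.1 = h.drop p.2)

-- ===== PRECONDITION & SPEC =====
-- Pre_ excludes exactly the inputs where Python A raises IndexError (hack[0] on an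
-- exhausted hack): those where string is nonempty and hack is a subsequence of
-- string without its last character.
def Pre_func (string : String) (hack : String) : Prop :=
  ¬ (string ≠ "" ∧ hack.toList.Sublist string.toList.dropLast)
instance (string : String) (hack : String) : Decidable (Pre_func string hack) := by
  unfold Pre_func; infer_instance

def pvWitness_func : String × String := ("abc", "bc")

def Spec_func (string : String) (hack : String) (out : Bool) : Prop := out = func_alt string hack
instance (string : String) (hack : String) (out : Bool) : Decidable (Spec_func string hack out) := by unfold Spec_func; infer_instance

-- ===== CLAIM (what is proved, stated in full; the proofs are below) =====
def Claim_equal_func : Prop := ∀ (string : String) (hack : String), Dom_func string hack → Pre_func string hack → Spec_func string hack (func string hack)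


-- ===== LEMMAS AND PROOFS =====

-- A returns false whenever string is strictly shorter than hack.
lemma funcA_short : ∀ (s h : List Char), s.length < h.length → funcA s h = false := by
  intro s
  induction s with
  | nil =>
    intro h hlt
    have hne : ([] : List Char) ≠ h := by
      intro he; rw [← he] at hlt; simp at hlt
    rw [funcA]; simp [hne]
  | cons c s' ih =>
    intro h hlt
    have hne : (c :: s') ≠ h := by
      intro he; rw [he] at hlt; omega
    match h with
    | [] => simp at hlt
    | b :: h' =>
      rw [funcA]
      simp only [if_neg hne]
      by_cases hcb : c = b
      · simp only [if_pos hcb]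
        exact ih h' (by simp at hlt ⊢; omega)
      · simp only [if_neg hcb]
        exact ih (b :: h') (by simp at hlt ⊢; omega)

-- On equal lengths A decides plain equality.
lemma funcA_eqlen : ∀ (s h : List Char), s.length = h.length → funcA s h = decide (s = h) := by
  intro s
  induction s with
  | nil =>
    intro h hlen
    have : h = [] := List.eq_nil_of_length_eq_zero hlen.symm
    subst this; rw [funcA]; simp
  | cons c s' ih =>
    intro h hlen
    match h with
    | [] => simp at hlen
    | b :: h' =>
      by_cases he : (c :: s') = (b :: h')
      · rw [funcA]; simp [he]
      · rw [funcA]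
        simp only [if_neg he, decide_eq_false he]
        by_cases hcb : c = b
        · simp only [if_pos hcb]
          have hs' : s' ≠ h' := by
            intro hss; exact he (by rw [hcb, hss])
          rw [ih h' (by simpa using hlen)]
          simp [hs']
        · simp only [if_neg hcb]
          exact funcA_short s' (b :: h') (by simp at hlen ⊢; omega)

-- The simulation: from state (i, j) of B's loop (invariants on the right), A run on
-- the corresponding suffixes computes exactly what B computes from (i, j).
lemma main_sim : ∀ (k : Nat) (s h : List Char), h.length ≤ s.length →
    ∀ (i j : Nat), s.length - i ≤ k → j ≤ i → i - j ≤ s.length - h.length → j ≤ h.length →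
    funcA (s.drop i) (h.drop j) =
      (let p := loopB s h (s.length - h.length) i j
       decide (s.drop p.1 = h.drop p.2)) := by
  intro k
  induction k with
  | zero =>
    intro s h hnm i j hk hji hd hjm
    have hi : i = s.length := by omega
    have hj : j = h.length := by omega
    have hguard : ¬ (j < h.length ∧ i - j < s.length - h.length) := by omega
    rw [loopB]
    simp only [dif_neg hguard]
    subst hi; subst hj
    simp [funcA]
  | succ k ih =>
    intro s h hnm i j hk hji hd hjm
    by_cases hguard : j < h.length ∧ i - j < s.length - h.length
    · -- loop takes a step
      have hin : i < s.length := by omega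
      have hjn : j < h.length := hguard.1
      rw [loopB]
      simp only [dif_pos hguard, List.getElem?_eq_getElem hin, List.getElem?_eq_getElem hjn]
      have hds : s.drop i = s[i] :: s.drop (i + 1) := List.drop_eq_getElem_cons hin
      have hdh : h.drop j = h[j] :: h.drop (j + 1) := List.drop_eq_getElem_cons hjn
      have hne : s.drop i ≠ h.drop j := by
        intro he
        have := congrArg List.length he
        simp only [List.length_drop] at this
        omega
      rw [hds, hdh]
      rw [hds, hdh] at hne
      rw [funcA]
      simp only [if_neg hne]
      by_cases hab : s[i] = h[j]
      · simp only [if_pos hab]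
        rw [ih s h hnm (i + 1) (j + 1) (by omega) (by omega) (by omega) (by omega)]
      · simp only [if_neg hab]
        rw [← hdh]
        simpa using ih s h hnm (i + 1) j (by omega) (by omega) (by omega) (by omega)
    · -- loop exits
      rw [loopB]
      simp only [dif_neg hguard]
      by_cases hde : i - j = s.length - h.length
      · -- equal remaining lengths: A decides suffix equality
        have hlen : (s.drop i).length = (h.drop j).length := by
          simp only [List.length_drop]; omega
        exact funcA_eqlen _ _ hlen
      · -- j = h.length with i - j < d: hack exhausted, string not; both are false
        have hjm' : j = h.length := by omega
        have hin : i < s.length := by omega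
        have hdh : h.drop j = [] := by
          apply List.drop_eq_nil_of_le; omega
        have hds : s.drop i = s[i] :: s.drop (i + 1) := List.drop_eq_getElem_cons hin
        rw [hdh, hds, funcA]
        simp
-- ===== VERDICT (by name: the statement is the Claim_ definition above) =====
theorem func_spec : Claim_equal_func := by
  intro string hack _ _
  unfold Spec_func func func_alt
  set s := string.toList
  set h := hack.toList
  by_cases hnm : h.length ≤ s.length
  · have hcond : ¬ ((s.length : Int) - (h.length : Int) < 0) := by
      omega
    simp only [if_neg hcond]
    have := main_sim s.length s h hnm 0 0 (by omega) (le_refl 0) (by omega) (by omega)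
    simpa using this
  · have hcond : (s.length : Int) - (h.length : Int) < 0 := by
      omega
    simp only [if_pos hcond]
    exact funcA_short s h (by omega)
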